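-- pv_equiv track=rewrite | github.com/Midotech31/g-synth-app | modules/crispr_designer.py | find_guides
-- ===== SOURCE A (Python) =====
-- def find_guides(sequence: str, pam_pattern: str, guide_len: int):
--     """
--     Slide window for guide + PAM and collect candidates.
--     """
--     seq = sequence.upper()
--     candidates = []
--     i = 0
--     while i <= len(seq) - (guide_len + len(pam_pattern)):
--         guide_seq = seq[i:i+guide_len]
--         pam_seq = seq[i+guide_len:i+guide_len+len(pam_pattern)]
--         # Simplistic PAM match: N matches any, others must match exactly
--         match = True
--         for p_char, s_char in zip(pam_pattern, pam_seq):
--             if p_char != "N" and p_char != s_char: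
--                 match = False
--                 break
--         if match:
--             candidates.append((i+1, guide_seq, pam_seq))
--         i += 1
--     return candidates
-- ===== SOURCE B (Python) =====
-- import re
--
--
-- def find_guides(sequence: str, pam_pattern: str, guide_len: int):
--     """
--     Slide window for guide + PAM and collect candidates.
--     """
--     seq = sequence.upper()
--     pam_regex = "".join("." if c == "N" else re.escape(c) for c in pam_pattern)
--     pattern = re.compile(f"(?=(.{{{guide_len}}})({pam_regex}))", re.DOTALL)
--     return [(m.start() + 1, m.group(1), m.group(2)) for m in pattern.finditer(seq)]
-- ===== Notes on version B (the rewrite author's own statement) =====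
-- stated objective: idiomatic
-- what changed: A's hand-rolled while-loop with explicit slicing and a zip-and-break PAM comparison is replaced by one compiled regex: the PAM pattern is translated to a regex ('N' -> '.', everything else escaped) and a zero-width lookahead '(?=(.{g})(pam))' with re.DOTALL is scanned once with finditer, yielding the 1-based position and the two captured groups directly.
-- outside the precondition, e.g. on find_guides('ACGT', 'GG', -1): A returns [(1, 'ACG', '')], B returns []
import Mathlib
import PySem

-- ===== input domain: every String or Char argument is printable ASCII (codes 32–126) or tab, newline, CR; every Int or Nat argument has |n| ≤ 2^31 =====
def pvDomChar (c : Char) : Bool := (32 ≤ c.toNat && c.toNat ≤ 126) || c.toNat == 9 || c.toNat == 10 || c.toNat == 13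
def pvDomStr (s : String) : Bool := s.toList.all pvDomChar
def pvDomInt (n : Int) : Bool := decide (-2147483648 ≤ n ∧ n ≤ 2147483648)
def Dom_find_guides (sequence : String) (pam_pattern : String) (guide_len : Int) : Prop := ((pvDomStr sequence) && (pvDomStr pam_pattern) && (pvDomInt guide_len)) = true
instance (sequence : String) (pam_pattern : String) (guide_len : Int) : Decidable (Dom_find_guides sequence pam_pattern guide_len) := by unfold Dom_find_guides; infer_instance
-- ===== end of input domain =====

-- B replaces A's explicit while-loop sliding window by a single compiled-regex
-- lookahead scan (idiomatic); equivalence is about the return value only.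

-- ===== PORT A =====
-- the inner 'for p_char, s_char in zip(...)' with break, returning the final 'match'
def pyMatchLoop : List (Char × Char) → Bool
  | [] => true
  | (p, s) :: rest => if p ≠ 'N' ∧ p ≠ s then false else pyMatchLoop rest

-- the 'while i <= len(seq) - (guide_len + len(pam_pattern))' loop, state (i, candidates)
def findGuidesLoopA (seq : List Char) (pam : List Char) (g : Int) (i : Int)
    (acc : List (Int × String × String)) : List (Int × String × String) :=
  if _h : i ≤ (seq.length : Int) - (g + (pam.length : Int)) then
    let guideSeq := PySem.List.slice seq (some i) (some (i + g))
    let pamSeq := PySem.List.slice seq (some (i + g)) (some (i + g + (pam.length : Int)))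
    let m := pyMatchLoop (pam.zip pamSeq)
    findGuidesLoopA seq pam g (i + 1)
      (if m then acc ++ [(i + 1, String.ofList guideSeq, String.ofList pamSeq)] else acc)
  else acc
termination_by ((seq.length : Int) - (g + (pam.length : Int)) + 1 - i).toNat
decreasing_by omega

def find_guides (sequence : String) (pam_pattern : String) (guide_len : Int) :
    List (Int × String × String) :=
  findGuidesLoopA (PySem.Chars.upper sequence.toList) pam_pattern.toList guide_len 0 []

-- ===== PORT B =====
-- the compiled PAM sub-regex: 'N' became '.', every other char a literal;
-- matching it consumes exactly pam.length characters and returns them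
def reMatchPam : List Char → List Char → Option (List Char)
  | [], _ => some []
  | _ :: _, [] => none
  | p :: ps, c :: cs => if p = 'N' || p = c then (reMatchPam ps cs).map (c :: ·) else none

-- one attempt of the lookahead '(?=(.{g})(pam))' at start position s (DOTALL)
def reMatchAt (seq : List Char) (g : Nat) (pam : List Char) (s : Nat) :
    Option (String × String) :=
  let rest := seq.drop s
  let guide := rest.take g
  if guide.length = g then
    (reMatchPam pam (rest.drop g)).map (fun pc => (String.ofList guide, String.ofList pc))
  else none

-- finditer over a zero-width pattern visits every position 0..len(seq)
def find_guides_alt (sequence : String) (pam_pattern : String) (guide_len : Int) :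
    List (Int × String × String) :=
  let seq := PySem.Chars.upper sequence.toList
  (List.range (seq.length + 1)).filterMap (fun s =>
    (reMatchAt seq guide_len.toNat pam_pattern.toList s).map
      (fun gp => ((s : Int) + 1, gp.1, gp.2)))

-- ===== PRECONDITION & SPEC =====
-- Pre_ excludes negative guide_len (a nonsensical guide length no caller would pass):
-- there A's negative-length slicing yields accidental windows while B's regex reads
-- '{-k}' as literal text — both values are artefacts, neither is the specified one.
def Pre_find_guides (sequence : String) (pam_pattern : String) (guide_len : Int) : Prop :=
  0 ≤ guide_len
instance (sequence : String) (pam_pattern : String) (guide_len : Int) :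
    Decidable (Pre_find_guides sequence pam_pattern guide_len) := by
  unfold Pre_find_guides; infer_instance

def pvWitness_find_guides : String × String × Int := ("ACGTTAGG", "NGG", 3)

def Spec_find_guides (sequence : String) (pam_pattern : String) (guide_len : Int)
    (out : List (Int × String × String)) : Prop :=
  out = find_guides_alt sequence pam_pattern guide_len
instance (sequence : String) (pam_pattern : String) (guide_len : Int)
    (out : List (Int × String × String)) :
    Decidable (Spec_find_guides sequence pam_pattern guide_len out) := by
  unfold Spec_find_guides; infer_instance

-- ===== CLAIM (what is proved, stated in full; the proofs are below) =====
def Claim_equal_find_guides : Prop := ∀ (sequence : String) (pam_pattern : String) (guide_len : Int), Dom_find_guides sequence pam_pattern guide_len → Pre_find_guides sequence pam_pattern guide_len → Spec_find_guides sequence pam_pattern guide_len (find_guides sequence pam_pattern guide_len)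

-- ===== LEMMAS AND PROOFS =====

-- B's PAM matcher, characterised against A's zip-and-break loop
theorem reMatchPam_eq (pam rest : List Char) :
    reMatchPam pam rest =
      if pam.length ≤ rest.length ∧ pyMatchLoop (pam.zip (rest.take pam.length)) = true
      then some (rest.take pam.length) else none := by
  induction pam generalizing rest with
  | nil => simp [reMatchPam, pyMatchLoop]
  | cons p ps ih =>
    cases rest with
    | nil => simp [reMatchPam]
    | cons c cs =>
      rw [reMatchPam, ih cs]
      simp only [List.take_succ_cons, List.zip_cons_cons, pyMatchLoop, List.length_cons]
      by_cases hp : p = 'N' ∨ p = c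
      · have hb : (p = 'N' || p = c) = true := by
          rcases hp with h | h <;> simp [h]
        have hnot : ¬ (p ≠ 'N' ∧ p ≠ c) := by tauto
        rw [if_pos hb, if_neg hnot]
        simp only [Nat.add_le_add_iff_right]
        split_ifs with h <;> simp
      · have hb : ¬ ((p = 'N' || p = c) = true) := by
          simp only [Bool.or_eq_true, decide_eq_true_eq]; tauto
        have hyes : (p ≠ 'N' ∧ p ≠ c) := by tauto
        rw [if_neg hb, if_pos hyes, if_neg]
        rintro ⟨-, h2⟩
        simp at h2
      
theorem reMatchAt_inside (seq pam : List Char) (g : Int) (hg : 0 ≤ g) (s : Nat)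
    (hs : (s : Int) ≤ (seq.length : Int) - (g + (pam.length : Int))) :
    (reMatchAt seq g.toNat pam s).map
        (fun gp => ((s : Int) + 1, gp.1, gp.2)) =
      (if pyMatchLoop (pam.zip ((seq.drop (s + g.toNat)).take pam.length)) then
        some ((s : Int) + 1, String.ofList ((seq.drop s).take g.toNat),
          String.ofList ((seq.drop (s + g.toNat)).take pam.length))
      else none) := by
  have hguide : ((seq.drop s).take g.toNat).length = g.toNat := by
    simp [List.length_take, List.length_drop]; omega
  have hrest : (seq.drop s).drop g.toNat = seq.drop (s + g.toNat) := by
    rw [List.drop_drop]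
  have hplen : pam.length ≤ (seq.drop (s + g.toNat)).length := by
    simp [List.length_drop]; omega
  simp only [reMatchAt, hrest, reMatchPam_eq]
  rw [if_pos hguide]
  by_cases hm : pyMatchLoop (pam.zip ((seq.drop (s + g.toNat)).take pam.length)) = true
  · rw [if_pos ⟨hplen, hm⟩, if_pos hm]
    rfl
  · rw [if_neg (fun h => hm h.2), if_neg hm]
    rfl


theorem reMatchAt_outside (seq pam : List Char) (g : Int) (hg : 0 ≤ g) (s : Nat)
    (hsl : s ≤ seq.length)
    (hs : ¬ (s : Int) ≤ (seq.length : Int) - (g + (pam.length : Int))) :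
    reMatchAt seq g.toNat pam s = none := by
  simp only [reMatchAt]
  by_cases hguide : ((seq.drop s).take g.toNat).length = g.toNat
  · have hlen : g.toNat ≤ seq.length - s := by
      simp [List.length_take, List.length_drop] at hguide; omega
    rw [if_pos hguide, reMatchPam_eq, if_neg]
    · simp
    · rintro ⟨h1, -⟩
      simp [List.length_drop] at h1
      omega
  · rw [if_neg hguide]

-- the whole while-loop equals a filterMap over the remaining start positions
theorem loopA_eq (seq pam : List Char) (g : Int) (hg : 0 ≤ g) :
    ∀ (k i : Nat) (acc : List (Int × String × String)), seq.length + 1 = i + k →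
      findGuidesLoopA seq pam g (i : Int) acc =
        acc ++ (List.range' i k).filterMap (fun s =>
          (reMatchAt seq g.toNat pam s).map (fun gp => ((s : Int) + 1, gp.1, gp.2))) := by
  intro k
  induction k with
  | zero =>
    intro i acc hik
    rw [findGuidesLoopA, dif_neg (by omega)]
    simp
  | succ k ih =>
    intro i acc hik
    rw [List.range'_succ, List.filterMap_cons]
    by_cases hcond : (i : Int) ≤ (seq.length : Int) - (g + (pam.length : Int))
    · rw [findGuidesLoopA, dif_pos hcond]
      have hslice1 : PySem.List.slice seq (some (i : Int)) (some ((i : Int) + g)) =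
          (seq.drop i).take g.toNat := by
        rw [PySem.List.slice_toNat seq (by omega) (by omega)]
        congr 1; omega
      have hslice2 : PySem.List.slice seq (some ((i : Int) + g))
            (some ((i : Int) + g + (pam.length : Int))) =
          (seq.drop (i + g.toNat)).take pam.length := by
        rw [PySem.List.slice_toNat seq (by omega) (by omega)]
        have h1 : ((i : Int) + g).toNat = i + g.toNat := by omega
        have h2 : ((i : Int) + g + (pam.length : Int)).toNat = i + g.toNat + pam.length := by
          omega
        rw [h1, h2]
        congr 1
        omega
      have hrec : ((i : Int) + 1) = ((i + 1 : Nat) : Int) := by push_cast; ring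
      simp only [hslice1, hslice2]
      rw [reMatchAt_inside seq pam g hg i hcond]
      rw [hrec, ih (i + 1) _ (by omega)]
      split_ifs with hm <;> simp
    · rw [findGuidesLoopA, dif_neg hcond]
      rw [reMatchAt_outside seq pam g hg i (by omega) hcond]
      simp only [Option.map_none]
      rw [List.filterMap_eq_nil_iff.mpr, List.append_nil]
      intro x hx
      have hmem := List.mem_range'_1.mp hx
      rw [reMatchAt_outside seq pam g hg x (by omega) (by omega)]
      rfl

-- ===== VERDICT (by name: the statement is the Claim_ definition above) =====
theorem find_guides_spec : Claim_equal_find_guides := by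
  intro sequence pam_pattern guide_len _hdom hpre
  unfold Spec_find_guides find_guides find_guides_alt
  have h := loopA_eq (PySem.Chars.upper sequence.toList) pam_pattern.toList guide_len hpre
    ((PySem.Chars.upper sequence.toList).length + 1) 0 [] (by omega)
  simpa [List.range_eq_range'] using h
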